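-- pv_equiv track=rewrite | github.com/mrloknath/GFG_POTD | 2024_06/12_06_2024(Count_numbers_containing_4).py | countNumberswith4
-- ===== SOURCE A (Python) =====
-- def countNumberswith4(n : int) -> int:
--     # code here
--     c = 0
--     for i in range(4, n + 1):
--         a = i
--         while a > 0:
--             if a % 10 == 4:
--                 c += 1
--                 break
--             a //= 10
--     return c
-- ===== SOURCE B (Python) =====
-- def countNumberswith4(n: int) -> int:
--     # Count numbers in 1..n containing the digit 4, by complement:
--     # n minus the count of numbers in 1..n with NO digit 4 (digit DP, O(log^2 n)).
--     if n < 0: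
--         return 0
--     return n - _no4_upto(n) + 1
--
--
-- def _no4_upto(n: int) -> int:
--     # count of x in [0, n] whose decimal representation contains no digit 4
--     if n < 0:
--         return 0
--     q, d = divmod(n, 10)
--     low = d + 1 if d < 4 else d  # digits b in 0..d with b != 4
--     return 9 * _no4_upto(q - 1) + (low if _no4(q) else 0)
--
--
-- def _no4(q: int) -> bool:
--     while q > 0:
--         if q % 10 == 4:
--             return False
--         q //= 10
--     return True
-- ===== Notes on version B (the rewrite author's own statement) =====
-- stated objective: faster
-- what changed: A scans every i in 4..n and tests its digits; B computes the answer in closed form as n minus a digit-DP count of numbers without the digit 4, recursing on n//10.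
import Mathlib
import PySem

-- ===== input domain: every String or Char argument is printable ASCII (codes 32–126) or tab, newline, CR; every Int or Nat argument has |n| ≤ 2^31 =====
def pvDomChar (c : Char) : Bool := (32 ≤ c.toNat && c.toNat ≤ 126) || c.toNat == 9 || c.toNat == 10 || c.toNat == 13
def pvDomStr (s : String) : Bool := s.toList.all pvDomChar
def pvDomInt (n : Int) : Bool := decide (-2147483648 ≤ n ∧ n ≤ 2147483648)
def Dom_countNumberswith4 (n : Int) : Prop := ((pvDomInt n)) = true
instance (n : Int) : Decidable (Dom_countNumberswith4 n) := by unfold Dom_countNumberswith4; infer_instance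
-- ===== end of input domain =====

-- B replaces A's scan of every i in 4..n by a closed-form digit-DP count (n minus the
-- count of numbers without a digit 4), an asymptotic speed-up; return values are equal.

-- bridge lemma cited by the ports' decreasing_by
theorem pv_fd10 (a : Int) : PySem.Int.floordiv a 10 = a / 10 :=
  PySem.Int.floordiv_eq_ediv_of_pos (by omega)


-- ===== PORT A =====
-- inner 'while a > 0' loop of A: returns true iff the loop hit 'break' (digit 4 found)
def pvHas4 (a : Int) : Bool :=
  if 0 < a then
    if PySem.Int.mod a 10 == 4 then true
    else pvHas4 (PySem.Int.floordiv a 10)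
  else false
termination_by a.toNat
decreasing_by simp only [pv_fd10]; omega

def countNumberswith4 (n : Int) : Int :=
  (PySem.List.pyRange 4 (n + 1) 1).foldl (fun c i => if pvHas4 i then c + 1 else c) 0

-- ===== PORT B =====
-- B's helper _no4: true iff q has no digit 4
def pvNo4 (q : Int) : Bool :=
  if 0 < q then
    if PySem.Int.mod q 10 == 4 then false
    else pvNo4 (PySem.Int.floordiv q 10)
  else true
termination_by q.toNat
decreasing_by simp only [pv_fd10]; omega

-- B's helper _no4_upto: count of x in [0, n] with no digit 4
def pvNo4Upto (n : Int) : Int :=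
  if n < 0 then 0
  else
    9 * pvNo4Upto (PySem.Int.floordiv n 10 - 1) +
      (if pvNo4 (PySem.Int.floordiv n 10) then
        (if PySem.Int.mod n 10 < 4 then PySem.Int.mod n 10 + 1 else PySem.Int.mod n 10)
       else 0)
termination_by (n + 1).toNat
decreasing_by simp only [pv_fd10]; omega

def countNumberswith4_alt (n : Int) : Int :=
  if n < 0 then 0 else n - pvNo4Upto n + 1

-- ===== PRECONDITION & SPEC =====
def Spec_countNumberswith4 (n : Int) (out : Int) : Prop := out = countNumberswith4_alt n
instance (n : Int) (out : Int) : Decidable (Spec_countNumberswith4 n out) := by unfold Spec_countNumberswith4; infer_instance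

-- ===== CLAIM (what is proved, stated in full; the proofs are below) =====
def Claim_equal_countNumberswith4 : Prop := ∀ (n : Int), Dom_countNumberswith4 n → Spec_countNumberswith4 n (countNumberswith4 n)

-- ===== LEMMAS AND PROOFS =====

theorem pv_md10 (a : Int) : PySem.Int.mod a 10 = a % 10 :=
  PySem.Int.mod_eq_emod_of_pos (by omega)

theorem pvHas4_pos {a : Int} (h : 0 < a) :
    pvHas4 a = (decide (a % 10 = 4) || pvHas4 (a / 10)) := by
  rw [pvHas4]
  simp [pv_fd10, pv_md10, h]

theorem pvHas4_nonpos {a : Int} (h : a ≤ 0) : pvHas4 a = false := by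
  rw [pvHas4]; simp [not_lt.2 h]

theorem pvNo4_zero : pvNo4 0 = true := by rw [pvNo4]; simp

theorem pvHas4_one : pvHas4 1 = false := by
  rw [pvHas4_pos (by norm_num)]
  norm_num [pvHas4_nonpos]

theorem pvNo4_eq_not : ∀ (k : Nat) (a : Int), a.toNat ≤ k → pvNo4 a = !pvHas4 a := by
  intro k
  induction k with
  | zero =>
    intro a ha
    rw [pvNo4, pvHas4]
    have h : ¬ (0 < a) := by omega
    simp [h]
  | succ k ih =>
    intro a ha
    rw [pvNo4, pvHas4]
    by_cases hp : 0 < a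
    · have hrec : pvNo4 (a / 10) = !pvHas4 (a / 10) := ih _ (by omega)
      simp [hp, hrec]
    · simp [hp]

theorem pvNo4Upto_neg {n : Int} (h : n < 0) : pvNo4Upto n = 0 := by
  rw [pvNo4Upto]; simp [h]

theorem pvNo4Upto_nonneg {n : Int} (h : 0 ≤ n) :
    pvNo4Upto n = 9 * pvNo4Upto (n / 10 - 1) +
      (if pvNo4 (n / 10) then (if n % 10 < 4 then n % 10 + 1 else n % 10) else 0) := by
  rw [pvNo4Upto]
  simp [pv_fd10, pv_md10, not_lt.2 h]

-- the key recurrence: stepping n by one changes the no-4 count by 0 or 1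
theorem pvStep : ∀ (k : Nat) (m : Int), m.toNat ≤ k → 0 < m →
    pvNo4Upto m = pvNo4Upto (m - 1) + (if pvHas4 m then 0 else 1) := by
  intro k
  induction k using Nat.strong_induction_on with
  | _ k ih =>
    intro m hk hm
    have h0 : (0:Int) ≤ m := le_of_lt hm
    have h1 : (0:Int) ≤ m - 1 := by omega
    rw [pvNo4Upto_nonneg h0, pvNo4Upto_nonneg h1, pvHas4_pos hm]
    rw [pvNo4_eq_not (m / 10).toNat (m / 10) le_rfl]
    by_cases hd : 1 ≤ m % 10
    · -- last digit nonzero: same prefix q, lower digit d-1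
      have e1 : (m - 1) / 10 = m / 10 := by omega
      have e2 : (m - 1) % 10 = m % 10 - 1 := by omega
      rw [e1, e2]
      rw [pvNo4_eq_not (m / 10).toNat (m / 10) le_rfl]
      have hd9 : m % 10 ≤ 9 := by omega
      cases hq : pvHas4 (m / 10) <;>
        simp only [hq, Bool.not_false, Bool.not_true, Bool.or_false, Bool.or_true,
          decide_eq_true_eq, if_true, if_false] <;>
        (generalize pvNo4Upto (m / 10 - 1) = X) <;> split_ifs <;> first | omega | simp_all
    · -- last digit zero: prefix drops from q to q - 1
      have hd0 : m % 10 = 0 := by omega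
      have e1 : (m - 1) / 10 = m / 10 - 1 := by omega
      have e2 : (m - 1) % 10 = 9 := by omega
      have hq1 : 1 ≤ m / 10 := by omega
      rw [e1, e2, hd0]
      rw [pvNo4_eq_not (m / 10 - 1).toNat (m / 10 - 1) le_rfl]
      by_cases hq : (1:Int) < m / 10
      · -- q ≥ 2: apply the recurrence (IH) at q - 1
        have hrec := ih (m / 10 - 1).toNat (by omega) (m / 10 - 1) le_rfl (by omega)
        rw [hrec]
        cases hA : pvHas4 (m / 10) <;> cases hB : pvHas4 (m / 10 - 1) <;>
          simp only [hA, hB, Bool.not_false, Bool.not_true, Bool.or_false, Bool.or_true,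
            decide_eq_true_eq, if_true, if_false] <;>
          (generalize pvNo4Upto (m / 10 - 1 - 1) = Y) <;> split_ifs <;> first | omega | simp_all
      · -- q = 1, so m = 10: everything concrete
        have hm10 : m / 10 = 1 := by omega
        rw [hm10]
        norm_num [pvHas4_one, pvHas4_nonpos, pvNo4Upto_neg,
          pvNo4Upto_nonneg (show (0:Int) ≤ 0 by norm_num), pvNo4_zero]

theorem range_step {n : Int} (h : 3 ≤ n) :
    PySem.List.pyRange 4 (n + 1 + 1) 1 = PySem.List.pyRange 4 (n + 1) 1 ++ [n + 1] :=
  PySem.List.pyRange_one_succ_right (by omega)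

theorem pvNo4Upto_three : pvNo4Upto 3 = 4 := by
  rw [pvNo4Upto_nonneg (by norm_num)]
  norm_num [pvNo4_zero, pvNo4Upto_neg]

theorem countA_ge : ∀ n : Int, 3 ≤ n → countNumberswith4 n = n - pvNo4Upto n + 1 := by
  intro n hn
  induction n, hn using Int.le_induction with
  | base =>
    unfold countNumberswith4
    rw [show (3:Int) + 1 = 4 by norm_num, PySem.List.pyRange_one_eq_nil le_rfl]
    simp only [List.foldl_nil]
    rw [pvNo4Upto_three]
    norm_num
  | succ n hn ih =>
    unfold countNumberswith4 at ih ⊢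
    rw [range_step hn, List.foldl_append]
    simp only [List.foldl_cons, List.foldl_nil]
    rw [ih]
    have hstep := pvStep (n + 1).toNat (n + 1) le_rfl (by omega)
    rw [show (n + 1 : Int) - 1 = n by ring] at hstep
    by_cases h4 : pvHas4 (n + 1) <;> simp [h4] at hstep ⊢ <;> omega

-- ===== VERDICT (by name: the statement is the Claim_ definition above) =====
theorem countNumberswith4_spec : Claim_equal_countNumberswith4 := by
  intro n _
  unfold Spec_countNumberswith4
  by_cases h3 : 3 ≤ n
  · rw [countA_ge n h3]
    unfold countNumberswith4_alt
    rw [if_neg (by omega)]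
  · unfold countNumberswith4 countNumberswith4_alt
    rw [PySem.List.pyRange_one_eq_nil (by omega)]
    simp only [List.foldl_nil]
    by_cases hneg : n < 0
    · rw [if_pos hneg]
    · rw [if_neg hneg]
      have hv : pvNo4Upto n = n + 1 := by
        rw [pvNo4Upto_nonneg (by omega)]
        have hq : n / 10 = 0 := by omega
        have hd : n % 10 = n := by omega
        rw [hq, hd]
        simp [pvNo4_zero, pvNo4Upto_neg, show n < 4 by omega]
      omega
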